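-- pv_equiv track=rewrite | github.com/OlegKopeykin/Sprint_1 | task_6.py | remove_duplicate_tickets
-- ===== SOURCE A (Python) =====
-- import copy
--
-- def remove_duplicate_tickets(tickets):
--     copy_tickets = copy.deepcopy(tickets)
--     all_tickets = []
--     duplicate_tickets = {}
--     for ticket in tickets.values():
--         all_tickets += ticket
--     for ticket in all_tickets:
--         duplicate_tickets[ticket] = duplicate_tickets.get(ticket, 0) + 1
--
--     for key, values in copy_tickets.items():
--         for ticket in values:
--             ticket_count = duplicate_tickets.get(ticket, 0)
--             if ticket_count > 1:
--                 for idx in range(1, 6):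
--                     if idx <= key:
--                         continue
--                     if ticket in tickets[idx]:
--                         tickets[idx].remove(ticket)
--                         duplicate_tickets[ticket] -= 1
--
--     return tickets
-- ===== SOURCE B (Python) =====
-- def remove_duplicate_tickets(tickets):
--     # One counting pass over the keys in ascending order gives, for every ticket
--     # value, how many occurrences of it sit in lower-numbered keys; each list of
--     # keys 1..5 then drops that many of its earliest occurrences in one pass.
--     # (A mutates its argument in place; B leaves it untouched and returns a new
--     # dict — the equivalence is about the return value.)
--     prefix = {}   # ticket value -> occurrences seen in numerically smaller keys
--     drops = {}    # key (1..5 only) -> {ticket value: how many earliest occurrences to drop}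
--     for k in sorted(tickets):
--         cnt = {}
--         for x in tickets[k]:
--             cnt[x] = cnt.get(x, 0) + 1
--         if 1 <= k <= 5:
--             drops[k] = {x: min(c, prefix.get(x, 0)) for x, c in cnt.items()}
--         for x, c in cnt.items():
--             prefix[x] = prefix.get(x, 0) + c
--     out = {}
--     for k, lst in tickets.items():
--         if k in drops:
--             drop = drops[k]
--             new = []
--             for x in lst:
--                 if drop.get(x, 0) > 0:
--                     drop[x] -= 1
--                 else:
--                     new.append(x)
--             out[k] = new
--         else:
--             out[k] = list(lst)
--     return out
-- ===== Notes on version B (the rewrite author's own statement) =====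
-- stated objective: alternative
-- what changed: Instead of simulating A's removal process (for every occurrence of a duplicated ticket, scanning buckets 1..5 with 'in'/'remove' linear list scans on a deep copy), B computes in one ascending-key counting pass how many occurrences of each ticket value sit in lower-numbered keys, and then filters each list of keys 1..5 in a single pass, dropping that many earliest occurrences per value.
import Mathlib
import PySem

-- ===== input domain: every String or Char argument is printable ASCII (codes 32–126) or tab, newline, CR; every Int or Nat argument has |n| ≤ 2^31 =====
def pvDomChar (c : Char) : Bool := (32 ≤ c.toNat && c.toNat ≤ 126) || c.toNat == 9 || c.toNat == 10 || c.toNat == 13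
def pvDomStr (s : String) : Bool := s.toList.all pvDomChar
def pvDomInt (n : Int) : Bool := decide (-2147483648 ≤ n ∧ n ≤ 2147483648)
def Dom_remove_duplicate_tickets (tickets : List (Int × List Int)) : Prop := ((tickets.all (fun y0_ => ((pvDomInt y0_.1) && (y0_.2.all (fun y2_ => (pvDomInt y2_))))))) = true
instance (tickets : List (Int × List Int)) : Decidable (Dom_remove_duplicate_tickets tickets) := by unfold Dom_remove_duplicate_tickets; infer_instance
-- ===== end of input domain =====

-- B replaces A's per-occurrence bucket scans (membership test + `.remove` on a deep copy,
-- for buckets 1..5) by one ascending-key counting pass plus one filtering pass per list;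
-- A mutates its argument in place, B builds a fresh dict — the equivalence is about the
-- return value (which for A is the mutated argument).

-- ===== PORT A =====
-- state of A's main loop: (the live `tickets` dict, the `duplicate_tickets` counter)
-- 'tickets[idx]' / 'duplicate_tickets[ticket]' are ported with getD: Python raises
-- KeyError where the key is absent — exactly the inputs Pre_ excludes ('duplicate_tickets[ticket]'
-- is always present: the counter was built over all tickets).
def aIdxStep (key t : Int) (st : PySem.Dict Int (List Int) × PySem.Dict Int Int) (idx : Int) :
    PySem.Dict Int (List Int) × PySem.Dict Int Int :=
  if idx ≤ key then st                                   -- 'if idx <= key: continue'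
  else
    let lst := st.1.getD idx []                          -- 'tickets[idx]' (KeyError when absent: outside Pre_)
    if lst.contains t then                               -- 'if ticket in tickets[idx]'
      (st.1.insert idx ((PySem.List.remove? lst t).getD lst),  -- 'tickets[idx].remove(ticket)' (first occurrence; guarded by the membership test)
       st.2.insert t (st.2.getD t 0 - 1))                -- 'duplicate_tickets[ticket] -= 1'
    else st

def aTicketStep (key : Int) (st : PySem.Dict Int (List Int) × PySem.Dict Int Int) (t : Int) :
    PySem.Dict Int (List Int) × PySem.Dict Int Int :=
  let ticket_count := st.2.getD t 0                      -- 'duplicate_tickets.get(ticket, 0)'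
  if ticket_count > 1 then
    (PySem.List.pyRange 1 6 1).foldl (aIdxStep key t) st -- 'for idx in range(1, 6)'
  else st

def aPairStep (st : PySem.Dict Int (List Int) × PySem.Dict Int Int) (kv : Int × List Int) :
    PySem.Dict Int (List Int) × PySem.Dict Int Int :=
  kv.2.foldl (aTicketStep kv.1) st                       -- 'for ticket in values'

def remove_duplicate_tickets (tickets : List (Int × List Int)) : List (Int × List Int) :=
  let d0 : PySem.Dict Int (List Int) := PySem.Dict.mk tickets      -- the argument dict
  -- copy.deepcopy(tickets) is the same value (we never mutate d0 itself)
  let all_tickets : List Int := d0.values.foldl (fun acc l => acc ++ l) []   -- 'all_tickets += ticket'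
  let duplicate_tickets : PySem.Dict Int Int :=
    all_tickets.foldl (fun c t => c.insert t (c.getD t 0 + 1)) PySem.Dict.empty  -- 'duplicate_tickets[ticket] = ….get(ticket,0)+1'
  let st := d0.items.foldl aPairStep (d0, duplicate_tickets)       -- 'for key, values in copy_tickets.items()'
  st.1.items

-- ===== PORT B =====
def bCount (l : List Int) : PySem.Dict Int Int :=        -- 'cnt[x] = cnt.get(x, 0) + 1'
  l.foldl (fun c x => c.insert x (c.getD x 0 + 1)) PySem.Dict.empty

def bKeyStep (d : PySem.Dict Int (List Int))
    (pd : PySem.Dict Int Int × PySem.Dict Int (PySem.Dict Int Int)) (k : Int) :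
    PySem.Dict Int Int × PySem.Dict Int (PySem.Dict Int Int) :=
  let cnt := bCount (d.getD k [])
  let drops :=
    if 1 ≤ k ∧ k ≤ 5 then                                -- 'if 1 <= k <= 5'
      pd.2.insert k (cnt.items.foldl (fun d xc => d.insert xc.1 (min xc.2 (pd.1.getD xc.1 0)))
        PySem.Dict.empty)
    else pd.2                                            -- '{x: min(c, prefix.get(x, 0)) for x, c in cnt.items()}'
  let pref := cnt.items.foldl (fun pr xc => pr.insert xc.1 (pr.getD xc.1 0 + xc.2)) pd.1
  (pref, drops)                                          -- 'prefix[x] = prefix.get(x, 0) + c'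

def bConsume (s : List Int × PySem.Dict Int Int) (x : Int) : List Int × PySem.Dict Int Int :=
  if s.2.getD x 0 > 0 then (s.1, s.2.insert x (s.2.getD x 0 - 1))  -- 'drop[x] -= 1'
  else (s.1 ++ [x], s.2)                                 -- 'new.append(x)'

def bOutStep (drops : PySem.Dict Int (PySem.Dict Int Int))
    (out : PySem.Dict Int (List Int)) (kv : Int × List Int) : PySem.Dict Int (List Int) :=
  if drops.contains kv.1 then                            -- 'if k in drops'
    out.insert kv.1 (kv.2.foldl bConsume ([], drops.getD kv.1 PySem.Dict.empty)).1
  else out.insert kv.1 kv.2                              -- 'out[k] = list(lst)'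

def remove_duplicate_tickets_alt (tickets : List (Int × List Int)) : List (Int × List Int) :=
  let d : PySem.Dict Int (List Int) := PySem.Dict.mk tickets
  let pd := (PySem.List.sorted d.keys (fun k => k) false).foldl (bKeyStep d)  -- 'for k in sorted(tickets)'
    (PySem.Dict.empty, PySem.Dict.empty)
  (d.items.foldl (bOutStep pd.2) PySem.Dict.empty).items -- 'for k, lst in tickets.items()'

-- ===== PRECONDITION & SPEC =====
-- Pre_ excludes exactly (i) association lists with duplicate keys, which cannot arise from a
-- Python dict argument (the Lean representation artefact of the dict boundary), and (ii) the
-- dicts on which Python A raises KeyError: a duplicated ticket value whose lowest-numbered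
-- key m satisfies m < 5 while some key in m+1..5 is missing from the dict.
def Pre_remove_duplicate_tickets (tickets : List (Int × List Int)) : Prop :=
  (tickets.map (·.1)).Nodup ∧
  ∀ p ∈ tickets, ∀ x ∈ p.2,
    2 ≤ (tickets.flatMap (·.2)).count x →
    ∀ j ∈ ([1, 2, 3, 4, 5] : List Int),
      (∃ q ∈ tickets, x ∈ q.2 ∧ q.1 < j) → j ∈ tickets.map (·.1)
instance (tickets : List (Int × List Int)) : Decidable (Pre_remove_duplicate_tickets tickets) := by
  unfold Pre_remove_duplicate_tickets; infer_instance

def pvWitness_remove_duplicate_tickets : (List (Int × List Int)) :=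
  [(1, [7, 8, 7]), (2, [7]), (3, []), (4, [9]), (5, [8, 9])]

def Spec_remove_duplicate_tickets (tickets : List (Int × List Int)) (out : List (Int × List Int)) : Prop :=
  out = remove_duplicate_tickets_alt tickets
instance (tickets : List (Int × List Int)) (out : List (Int × List Int)) : Decidable (Spec_remove_duplicate_tickets tickets out) := by
  unfold Spec_remove_duplicate_tickets; infer_instance

-- ===== CLAIM (what is proved, stated in full; the proofs are below) =====
def Claim_equal_remove_duplicate_tickets : Prop := ∀ (tickets : List (Int × List Int)), Dom_remove_duplicate_tickets tickets → Pre_remove_duplicate_tickets tickets → Spec_remove_duplicate_tickets tickets (remove_duplicate_tickets tickets)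

-- ===== LEMMAS AND PROOFS =====

def dropF (q : Int → Int) : List Int → List Int
  | [] => []
  | a :: l => if 0 < q a then dropF (fun y => if y = a then q y - 1 else q y) l else a :: dropF q l

theorem dropF_congr : ∀ (l : List Int) (q q' : Int → Int), (∀ x ∈ l, q x = q' x) → dropF q l = dropF q' l
  | [], _, _, _ => rfl
  | a :: l, q, q', h => by
    simp only [dropF, h a (List.mem_cons_self)]
    split_ifs with hq
    · exact dropF_congr l _ _ (fun x hx => by
        by_cases hxa : x = a
        · simp only [hxa, if_pos rfl, h a List.mem_cons_self]
        · simp only [if_neg hxa, h x (List.mem_cons_of_mem _ hx)])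
    · rw [dropF_congr l q q' (fun x hx => h x (List.mem_cons_of_mem _ hx))]

theorem dropF_nonpos : ∀ (l : List Int) (q : Int → Int), (∀ x ∈ l, q x ≤ 0) → dropF q l = l
  | [], _, _ => rfl
  | a :: l, q, h => by
    simp only [dropF, if_neg (not_lt.2 (h a List.mem_cons_self))]
    exact congrArg (a :: ·) (dropF_nonpos l q fun x hx => h x (List.mem_cons_of_mem _ hx))

theorem mem_dropF : ∀ (l : List Int) (q : Int → Int) (x : Int), 0 ≤ q x →
    (x ∈ dropF q l ↔ q x < (l.count x : Int))
  | [], q, x, hq => by simpa [dropF] using not_lt.2 hq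
  | a :: l, q, x, hq => by
    by_cases hxa : x = a
    · subst hxa
      simp only [dropF]
      split_ifs with hqa
      · rw [mem_dropF l _ x (by simp; omega)]
        simp [List.count_cons_self] <;> omega
      · simp only [List.mem_cons, true_or, true_iff, List.count_cons_self]
        push_cast; omega
    · have hax : ¬ a = x := fun h => hxa h.symm
      simp only [dropF]
      split_ifs with hqa
      · rw [mem_dropF l _ x (by simp [hxa]; exact hq)]
        simp [List.count_cons, hax, hxa]
      · simp only [List.mem_cons, hxa, false_or]
        rw [mem_dropF l q x hq]
        simp [List.count_cons, hax]

theorem erase_dropF : ∀ (l : List Int) (q : Int → Int) (x : Int), 0 ≤ q x → q x < (l.count x : Int) →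
    (dropF q l).erase x = dropF (fun y => if y = x then q y + 1 else q y) l
  | [], q, x, hq, hcnt => by simp at hcnt; omega
  | a :: l, q, x, hq, hcnt => by
    by_cases hxa : x = a
    · subst hxa
      have hcnt' : q x < (l.count x : Int) + 1 := by
        rw [List.count_cons_self] at hcnt; push_cast at hcnt; omega
      simp only [dropF, eq_self_iff_true, if_true]
      rw [if_pos (show (0:Int) < q x + 1 by omega)]
      by_cases hqa : 0 < q x
      · rw [if_pos hqa]
        rw [erase_dropF l _ x (by simp; omega) (by simp; omega)]
        apply dropF_congr; intro y _
        by_cases hy : y = x <;> simp [hy]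
      · rw [if_neg hqa, List.erase_cons_head]
        apply dropF_congr; intro y _
        by_cases hy : y = x <;> simp [hy]
    · have hax : ¬ a = x := fun h => hxa h.symm
      have hga : (if a = x then q a + 1 else q a) = q a := by simp [hax]
      have hcl : q x < (l.count x : Int) := by
        rw [List.count_cons] at hcnt
        simp [hax] at hcnt
        exact hcnt
      simp only [dropF, hga]
      by_cases hqa : 0 < q a
      · rw [if_pos hqa, if_pos hqa]
        rw [erase_dropF l _ x (by simp [hxa]; exact hq) (by simp [hxa]; exact hcl)]
        apply dropF_congr; intro y _
        by_cases hy : y = x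
        · subst hy; simp [hxa]
        · by_cases hy2 : y = a <;> simp [hy, hy2, hax]
      · rw [if_neg hqa, if_neg hqa, List.erase_cons_tail (by simp [hax])]
        rw [erase_dropF l q x hq hcl]
-- ===== counting abstractions =====
def cB (T : List (Int × List Int)) (j x : Int) : Int := (((PySem.Dict.mk T).getD j []).count x : Int)
def SB (T : List (Int × List Int)) (j x : Int) : Int :=
  (((T.filter (fun p => decide (p.1 < j))).flatMap (fun p => p.2)).count x : Int)
def totB (T : List (Int × List Int)) (x : Int) : Int := ((T.flatMap (fun p => p.2)).count x : Int)
def DO (O : List (Int × Int)) (j x : Int) : Int :=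
  (O.countP (fun e => decide (e.1 < j) && decide (e.2 = x)) : Int)
def rO (T : List (Int × List Int)) (O : List (Int × Int)) (k x : Int) : Int :=
  if 1 ≤ k ∧ k ≤ 5 then min (cB T k x) (DO O k x) else 0
def sumR (T : List (Int × List Int)) (O : List (Int × Int)) (x : Int) : Int :=
  (T.map (fun p => rO T O p.1 x)).sum
def occStream (L : List (Int × List Int)) : List (Int × Int) :=
  L.flatMap (fun p => p.2.map (fun x => (p.1, x)))
def validO (T : List (Int × List Int)) (O : List (Int × Int)) : Prop :=
  ∀ e ∈ O, ∃ p ∈ T, p.1 = e.1 ∧ e.2 ∈ p.2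

theorem cB_nonneg (T : List (Int × List Int)) (j x : Int) : 0 ≤ cB T j x := Int.natCast_nonneg _
theorem DO_nonneg (O : List (Int × Int)) (j x : Int) : 0 ≤ DO O j x := Int.natCast_nonneg _
theorem SB_nonneg (T : List (Int × List Int)) (j x : Int) : 0 ≤ SB T j x := Int.natCast_nonneg _

theorem rO_nonneg (T : List (Int × List Int)) (O : List (Int × Int)) (k x : Int) : 0 ≤ rO T O k x := by
  unfold rO; split_ifs
  · exact le_min (cB_nonneg T k x) (DO_nonneg O k x)
  · exact le_refl 0

theorem rO_le_cB (T : List (Int × List Int)) (O : List (Int × Int)) (k x : Int) : rO T O k x ≤ cB T k x := by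
  unfold rO; split_ifs
  · exact min_le_left _ _
  · exact cB_nonneg T k x

theorem items_mk (L : List (Int × List Int)) : (PySem.Dict.mk L).items = L := rfl

theorem cB_of_mem (T : List (Int × List Int)) (p : Int × List Int) (x : Int)
    (hnd : (T.map (·.1)).Nodup) (hp : p ∈ T) : cB T p.1 x = (p.2.count x : Int) := by
  unfold cB
  rw [PySem.Dict.getD_of_mem_items (d := PySem.Dict.mk T) (k := p.1) (v := p.2)
    (by simpa using hp) (by simpa [PySem.Dict.keys] using hnd)]

theorem cB_of_not_mem (T : List (Int × List Int)) (j x : Int)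
    (h : j ∉ T.map (·.1)) : cB T j x = 0 := by
  unfold cB
  rw [PySem.Dict.getD_of_not_contains]
  · simp
  · rw [Bool.eq_false_iff]
    intro hcon
    exact h (by simpa [PySem.Dict.keys] using (PySem.Dict.contains_iff_mem_keys _ _).1 hcon)

theorem sum_map_sub {α : Type} (l : List α) (f g : α → Int) :
    (l.map (fun a => f a - g a)).sum = (l.map f).sum - (l.map g).sum := by
  induction l with
  | nil => simp
  | cons a l ih => simp [ih]; ring

theorem totB_eq_sum (T : List (Int × List Int)) (x : Int) :
    totB T x = (T.map (fun p => (p.2.count x : Int))).sum := by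
  induction T with
  | nil => simp [totB]
  | cons p T ih =>
    unfold totB at ih ⊢
    simp only [List.flatMap_cons, List.count_append, List.map_cons, List.sum_cons, ← ih]
    push_cast
    ring

theorem DO_nil (j x : Int) : DO [] j x = 0 := rfl

theorem DO_append (O O' : List (Int × Int)) (j x : Int) :
    DO (O ++ O') j x = DO O j x + DO O' j x := by
  unfold DO; rw [List.countP_append]; push_cast; ring

theorem DO_single (k t j x : Int) : DO [(k, t)] j x = if k < j ∧ t = x then 1 else 0 := by
  unfold DO
  by_cases h1 : k < j <;> by_cases h2 : t = x <;> simp [List.countP_cons, h1, h2]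

theorem rO_nil (T : List (Int × List Int)) (k x : Int) : rO T [] k x = 0 := by
  unfold rO; split_ifs
  · rw [DO_nil]; exact min_eq_right (cB_nonneg T k x)
  · rfl

theorem sumR_nil (T : List (Int × List Int)) (x : Int) : sumR T [] x = 0 := by
  unfold sumR
  rw [List.map_congr_left (fun p _ => rO_nil T p.1 x)]
  simp

theorem DO_occStream (j x : Int) : ∀ (T : List (Int × List Int)), DO (occStream T) j x = SB T j x
  | [] => rfl
  | p :: T => by
    have ih := DO_occStream j x T
    unfold occStream at ih ⊢
    rw [List.flatMap_cons, show ∀ O O', DO (O ++ O') j x = DO O j x + DO O' j x from fun _ _ => DO_append _ _ j x, ih]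
    unfold SB DO
    rw [List.countP_map, List.filter_cons]
    by_cases hj : p.1 < j
    · simp only [hj, decide_true, if_pos]
      rw [List.flatMap_cons, List.count_append]
      have : (List.countP ((fun e => decide (e.1 < j) && decide (e.2 = x)) ∘ fun y => (p.1, y)) p.2)
          = p.2.count x := by
        unfold List.count
        apply List.countP_congr
        intro y _
        simp [hj]
      rw [this]
      push_cast
      ring
    · simp only [hj, decide_false]
      have : (List.countP ((fun e => decide (e.1 < j) && decide (e.2 = x)) ∘ fun y => (p.1, y)) p.2) = 0 := by
        apply List.countP_eq_zero.2
        intro y _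
        simp [hj]
      rw [this]
      simp

theorem exists_min_key : ∀ (S : List (Int × List Int)), S ≠ [] → ∃ pm ∈ S, ∀ p' ∈ S, pm.1 ≤ p'.1
  | [], h => absurd rfl h
  | p :: S, _ => by
    rcases S with _ | ⟨q, S'⟩
    · exact ⟨p, List.mem_cons_self, by intro p' hp'; simp at hp'; subst hp'; exact le_refl _⟩
    · obtain ⟨pm, hpm, hmin⟩ := exists_min_key (q :: S') (by simp)
      by_cases hle : p.1 ≤ pm.1
      · refine ⟨p, List.mem_cons_self, ?_⟩
        intro p' hp'
        rcases List.mem_cons.1 hp' with h | h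
        · subst h; exact le_refl _
        · exact le_trans hle (hmin p' h)
      · refine ⟨pm, List.mem_cons_of_mem _ hpm, ?_⟩
        intro p' hp'
        rcases List.mem_cons.1 hp' with h | h
        · subst h; omega
        · exact hmin p' h

theorem guard_noop (T : List (Int × List Int)) (hnd : (T.map (·.1)).Nodup)
    (O : List (Int × Int)) (hv : validO T O) (p0 : Int × List Int) (hp0 : p0 ∈ T)
    (t : Int) (ht : t ∈ p0.2) (hle : totB T t - sumR T O t ≤ 1) :
    ∀ j, p0.1 < j → 1 ≤ j → j ≤ 5 → cB T j t ≤ DO O j t := by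
  intro j hkj h1j hj5
  -- the minimal key whose bucket contains t
  obtain ⟨pm, hpmS, hminS⟩ := exists_min_key (T.filter (fun p => decide (t ∈ p.2)))
    (List.ne_nil_of_mem (List.mem_filter.2 ⟨hp0, by simpa using ht⟩))
  have hpm : pm ∈ T := (List.mem_filter.1 hpmS).1
  have htm : t ∈ pm.2 := by simpa using (List.mem_filter.1 hpmS).2
  have hmin : ∀ p' ∈ T, t ∈ p'.2 → pm.1 ≤ p'.1 := fun p' hp' ht' =>
    hminS p' (List.mem_filter.2 ⟨hp', by simpa using ht'⟩)
  have hDOm : DO O pm.1 t = 0 := by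
    unfold DO
    rw [List.countP_eq_zero.2]
    · rfl
    · intro e he
      simp only [Bool.and_eq_true, decide_eq_true_eq]
      rintro ⟨hlt, hte⟩
      obtain ⟨p', hp', hk', ht'⟩ := hv e he
      have := hmin p' hp' (hte ▸ ht')
      omega
  have hrOm : rO T O pm.1 t = 0 := by
    unfold rO; split_ifs
    · rw [hDOm]; exact min_eq_right (cB_nonneg T pm.1 t)
    · rfl
  -- the slack sum
  have hG : (T.map (fun p => (p.2.count t : Int) - rO T O p.1 t)).sum ≤ 1 := by
    rw [sum_map_sub, ← totB_eq_sum]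
    exact hle
  by_cases hjK : j ∈ T.map (·.1)
  · obtain ⟨pj, hpj, hkj'⟩ := List.mem_map.1 hjK
    have hne : pj ≠ pm := by
      intro h
      have := hmin p0 hp0 ht
      rw [h] at hkj'
      omega
    have hperm : T.Perm (pm :: T.erase pm) := List.perm_cons_erase hpm
    have hsum : (T.map (fun p => (p.2.count t : Int) - rO T O p.1 t)).sum
        = ((pm.2.count t : Int) - rO T O pm.1 t)
          + ((T.erase pm).map (fun p => (p.2.count t : Int) - rO T O p.1 t)).sum := by
      rw [(hperm.map _).sum_eq]
      simp
    have hm1 : (1:Int) ≤ (pm.2.count t : Int) - rO T O pm.1 t := by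
      rw [hrOm]
      have : 0 < pm.2.count t := List.count_pos_iff.2 htm
      omega
    have hjmem : pj ∈ T.erase pm := (List.mem_erase_of_ne hne).2 hpj
    have hjle : ((pj.2.count t : Int) - rO T O pj.1 t)
        ≤ ((T.erase pm).map (fun p => (p.2.count t : Int) - rO T O p.1 t)).sum := by
      apply List.single_le_sum
      · intro y hy
        obtain ⟨p', hp', hy'⟩ := List.mem_map.1 hy
        have hp'T : p' ∈ T := List.mem_of_mem_erase hp'
        have := rO_le_cB T O p'.1 t
        rw [cB_of_mem T p' t hnd hp'T] at this
        omega
      · exact List.mem_map.2 ⟨pj, hjmem, rfl⟩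
    have hzero : (pj.2.count t : Int) - rO T O pj.1 t ≤ 0 := by omega
    have hge : rO T O pj.1 t ≤ cB T pj.1 t := rO_le_cB T O pj.1 t
    rw [cB_of_mem T pj t hnd hpj] at hge
    have heq : (pj.2.count t : Int) = rO T O pj.1 t := by omega
    have : cB T j t = rO T O j t := by
      rw [← hkj', cB_of_mem T pj t hnd hpj, heq]
    rw [this]
    unfold rO
    rw [if_pos ⟨h1j, hj5⟩]
    exact min_le_right _ _
  · rw [cB_of_not_mem T j t hjK]
    exact DO_nonneg O j t

-- ===== A-side loop invariants =====
def rI (T : List (Int × List Int)) (O : List (Int × Int)) (k t : Int) (I : List Int) (j x : Int) : Int :=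
  if j ∈ I then rO T (O ++ [(k, t)]) j x else rO T O j x

def INVA (T : List (Int × List Int)) (O : List (Int × Int))
    (st : PySem.Dict Int (List Int) × PySem.Dict Int Int) : Prop :=
  st.1 = PySem.Dict.mk (T.map (fun p => (p.1, dropF (rO T O p.1) p.2))) ∧
  ∀ x, st.2.getD x 0 = totB T x - sumR T O x

def INVI (T : List (Int × List Int)) (O : List (Int × Int)) (k t : Int) (I : List Int)
    (st : PySem.Dict Int (List Int) × PySem.Dict Int Int) : Prop :=
  st.1 = PySem.Dict.mk (T.map (fun p => (p.1, dropF (rI T O k t I p.1) p.2))) ∧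
  ∀ x, st.2.getD x 0 = totB T x - (T.map (fun p => rI T O k t I p.1 x)).sum

theorem rO_append_single_le (T : List (Int × List Int)) (O : List (Int × Int)) (k t j x : Int)
    (h : j ≤ k) : rO T (O ++ [(k, t)]) j x = rO T O j x := by
  unfold rO
  by_cases hr : 1 ≤ j ∧ j ≤ 5
  · rw [if_pos hr, if_pos hr, DO_append, DO_single,
      if_neg (show ¬(k < j ∧ t = x) by omega), add_zero]
  · rw [if_neg hr, if_neg hr]

theorem rO_append_single_ne (T : List (Int × List Int)) (O : List (Int × Int)) (k t j x : Int)
    (h : x ≠ t) : rO T (O ++ [(k, t)]) j x = rO T O j x := by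
  unfold rO
  by_cases hr : 1 ≤ j ∧ j ≤ 5
  · rw [if_pos hr, if_pos hr, DO_append, DO_single,
      if_neg (show ¬(k < j ∧ t = x) from fun hc => h hc.2.symm), add_zero]
  · rw [if_neg hr, if_neg hr]

theorem rI_snoc (T : List (Int × List Int)) (O : List (Int × Int)) (k t : Int) (I : List Int)
    (idx j x : Int) (hIdx : idx ∉ I) :
    rI T O k t (I ++ [idx]) j x = if j = idx then rO T (O ++ [(k, t)]) j x else rI T O k t I j x := by
  by_cases hj : j = idx
  · subst hj
    simp [rI, hIdx]
  · simp [rI, List.mem_append, hj]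

theorem rI_nil (T : List (Int × List Int)) (O : List (Int × Int)) (k t j x : Int) :
    rI T O k t [] j x = rO T O j x := by simp [rI]

theorem rI_full (T : List (Int × List Int)) (O : List (Int × Int)) (k t j x : Int) :
    rI T O k t [1, 2, 3, 4, 5] j x = rO T (O ++ [(k, t)]) j x := by
  by_cases hj : j ∈ ([1, 2, 3, 4, 5] : List Int)
  · simp [rI, hj]
  · have hr : ¬(1 ≤ j ∧ j ≤ 5) := by simp at hj; omega
    simp only [rI, if_neg hj]
    unfold rO
    rw [if_neg hr, if_neg hr]

-- congruence helpers for the two invariant components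
theorem mkmap_congr (T : List (Int × List Int)) (f g : Int → Int → Int)
    (h : ∀ p ∈ T, ∀ x, f p.1 x = g p.1 x) :
    T.map (fun p => (p.1, dropF (f p.1) p.2)) = T.map (fun p => (p.1, dropF (g p.1) p.2)) := by
  apply List.map_congr_left
  intro p hp
  have : f p.1 = g p.1 := funext (h p hp)
  rw [this]

theorem summap_congr (T : List (Int × List Int)) (f g : Int → Int → Int) (x : Int)
    (h : ∀ p ∈ T, f p.1 x = g p.1 x) :
    (T.map (fun p => f p.1 x)).sum = (T.map (fun p => g p.1 x)).sum := by
  rw [List.map_congr_left (fun p hp => h p hp)]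

theorem pair_fst {A B : Type} (a : A) (b : B) : (a, b).1 = a := rfl
theorem pair_snd {A B : Type} (a : A) (b : B) : (a, b).2 = b := rfl

theorem key_inj (T : List (Int × List Int)) (hnd : (T.map (·.1)).Nodup)
    (p q : Int × List Int) (hp : p ∈ T) (hq : q ∈ T) (h : p.1 = q.1) : p = q :=
  List.inj_on_of_nodup_map hnd hp hq h

theorem sum_map_update (T : List (Int × List Int)) (hnd : (T.map (·.1)).Nodup)
    (pj : Int × List Int) (hpj : pj ∈ T) (f g : Int × List Int → Int)
    (hother : ∀ p ∈ T, p ≠ pj → g p = f p) :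
    (T.map g).sum = (T.map f).sum + (g pj - f pj) := by
  have hTnd : T.Nodup := hnd.of_map
  have hperm : T.Perm (pj :: T.erase pj) := List.perm_cons_erase hpj
  have herase : ∀ p ∈ T.erase pj, g p = f p := by
    intro p hp
    have := (List.Nodup.mem_erase_iff hTnd).1 hp
    exact hother p this.2 this.1
  rw [((hperm.map g)).sum_eq, ((hperm.map f)).sum_eq]
  simp only [List.map_cons, List.sum_cons]
  rw [List.map_congr_left herase]
  ring

theorem idx_step (T : List (Int × List Int)) (hnd : (T.map (·.1)).Nodup)
    (O : List (Int × Int)) (k t : Int) (I : List Int) (idx : Int)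
    (hrange : 1 ≤ idx ∧ idx ≤ 5) (hIdx : idx ∉ I)
    (st : PySem.Dict Int (List Int) × PySem.Dict Int Int)
    (h : INVI T O k t I st) : INVI T O k t (I ++ [idx]) (aIdxStep k t st idx) := by
  obtain ⟨h1, h2⟩ := h
  simp only [aIdxStep]
  by_cases hle : idx ≤ k
  · rw [if_pos hle]
    have hEq : ∀ p ∈ T, ∀ x, rI T O k t I p.1 x = rI T O k t (I ++ [idx]) p.1 x := by
      intro p hp x
      rw [rI_snoc T O k t I idx p.1 x hIdx]
      by_cases hpj : p.1 = idx
      · rw [if_pos hpj, hpj, rO_append_single_le T O k t idx x hle]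
        simp [rI, hIdx]
      · rw [if_neg hpj]
    refine ⟨?_, ?_⟩
    · rw [h1]
      exact congrArg PySem.Dict.mk (mkmap_congr T _ _ hEq)
    · intro x
      rw [h2 x, summap_congr T _ _ x (fun p hp => hEq p hp x)]
  · rw [if_neg hle]
    have hki : k < idx := by omega
    by_cases hKey : idx ∈ T.map (·.1)
    · obtain ⟨pj, hpj, hpj1⟩ := List.mem_map.1 hKey
      have hndm : (PySem.Dict.mk (T.map (fun p => (p.1, dropF (rI T O k t I p.1) p.2)))).keys.Nodup := by
        simpa [PySem.Dict.keys, items_mk, List.map_map, Function.comp] using hnd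
      have hmem_items : ((idx : Int), dropF (rI T O k t I idx) pj.2)
          ∈ T.map (fun p => (p.1, dropF (rI T O k t I p.1) p.2)) :=
        List.mem_map.2 ⟨pj, hpj, by rw [hpj1]⟩
      have hbucket : st.1.getD idx [] = dropF (rI T O k t I idx) pj.2 := by
        rw [h1]
        rw [PySem.Dict.getD_of_mem_items _ hmem_items hndm]
      have hq0 : ∀ x, 0 ≤ rI T O k t I idx x := by
        intro x; unfold rI; split_ifs
        all_goals first
          | exact rO_nonneg T (O ++ [(k, t)]) idx x
          | exact rO_nonneg T O idx x
      have hqO : ∀ x, rI T O k t I idx x = rO T O idx x := by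
        intro x; simp [rI, hIdx]
      have hcb : cB T idx t = (pj.2.count t : Int) := by
        rw [← hpj1]; exact cB_of_mem T pj t hnd hpj
      have hqmin : rI T O k t I idx t = min (cB T idx t) (DO O idx t) := by
        rw [hqO]; unfold rO; rw [if_pos hrange]
      have hO'min : ∀ x, rO T (O ++ [(k, t)]) idx x
          = min (cB T idx x) (DO O idx x + if k < idx ∧ t = x then 1 else 0) := by
        intro x; unfold rO
        rw [if_pos hrange, DO_append, DO_single]
      rw [hbucket]
      by_cases hmem : t ∈ dropF (rI T O k t I idx) pj.2
      · have hcont : (dropF (rI T O k t I idx) pj.2).contains t = true := by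
          simpa using hmem
        rw [if_pos hcont]
        have hcnt : rI T O k t I idx t < (pj.2.count t : Int) :=
          (mem_dropF pj.2 _ t (hq0 t)).1 hmem
        have hDlt : DO O idx t < cB T idx t := by
          have hlt : min (cB T idx t) (DO O idx t) < cB T idx t := by
            rw [← hqmin, hcb]; exact hcnt
          rcases min_cases (cB T idx t) (DO O idx t) with ⟨hm, _⟩ | ⟨_, hcd⟩
          · rw [hm] at hlt; exact absurd hlt (lt_irrefl _)
          · exact hcd
        have hrem : (PySem.List.remove? (dropF (rI T O k t I idx) pj.2) t).getD
              (dropF (rI T O k t I idx) pj.2)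
            = (dropF (rI T O k t I idx) pj.2).erase t := by
          rw [PySem.List.remove?_eq_some_erase _ t hmem]; rfl
        rw [hrem, erase_dropF pj.2 _ t (hq0 t) hcnt]
        have hnewfun : (fun y => if y = t then rI T O k t I idx y + 1 else rI T O k t I idx y)
            = rI T O k t (I ++ [idx]) idx := by
          funext x
          rw [rI_snoc T O k t I idx idx x hIdx, if_pos rfl, hO'min x]
          by_cases hx : x = t
          · rw [if_pos hx, hx, if_pos ⟨hki, rfl⟩, hqmin,
              min_eq_right (le_of_lt hDlt), min_eq_right (by omega)]
          · rw [if_neg hx, if_neg (show ¬(k < idx ∧ t = x) from fun hc => hx hc.2.symm),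
              add_zero, hqO x]
            unfold rO; rw [if_pos hrange]
        refine ⟨?_, ?_⟩
        · rw [h1, pair_fst]
          apply PySem.Dict.ext
          rw [PySem.Dict.items_insert_of_contains _ _ (by
            apply (PySem.Dict.contains_iff_mem_keys _ _).2
            simpa [PySem.Dict.keys, items_mk, List.map_map, Function.comp] using hKey)]
          rw [items_mk, items_mk, List.map_map]
          apply List.map_congr_left
          intro p hp
          by_cases hpidx : p.1 = idx
          · have hppj : p = pj := key_inj T hnd p pj hp hpj (by rw [hpidx, hpj1])
            simp only [Function.comp_apply]
            rw [if_pos (by simp [hpidx])]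
            rw [hnewfun, ← hppj, hpidx]
          · simp only [Function.comp_apply]
            rw [if_neg (by simp [hpidx])]
            have hfn : rI T O k t (I ++ [idx]) p.1 = rI T O k t I p.1 :=
              funext fun x => by rw [rI_snoc T O k t I idx p.1 x hIdx, if_neg hpidx]
            rw [hfn]
        · intro x
          rw [pair_snd]
          by_cases hx : x = t
          · rw [PySem.Dict.getD_insert, if_pos hx, hx, h2 t]
            have hone : rI T O k t (I ++ [idx]) pj.1 t - rI T O k t I pj.1 t = 1 := by
              rw [hpj1, rI_snoc T O k t I idx idx t hIdx, if_pos rfl, hO'min t,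
                if_pos ⟨hki, rfl⟩, hqmin,
                min_eq_right (le_of_lt hDlt), min_eq_right (by omega)]
              ring
            rw [sum_map_update T hnd pj hpj
              (fun p => rI T O k t I p.1 t) (fun p => rI T O k t (I ++ [idx]) p.1 t)
              (fun p hp hne => by
                change rI T O k t (I ++ [idx]) p.1 t = rI T O k t I p.1 t
                rw [rI_snoc T O k t I idx p.1 t hIdx,
                  if_neg (fun hc => hne (key_inj T hnd p pj hp hpj (by rw [hc, hpj1])))]),
              hone]
            ring
          · rw [PySem.Dict.getD_insert, if_neg hx, h2 x]
            congr 1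
            apply summap_congr
            intro p hp
            rw [rI_snoc T O k t I idx p.1 x hIdx]
            by_cases hpidx : p.1 = idx
            · rw [if_pos hpidx, hpidx, hO'min x,
                if_neg (show ¬(k < idx ∧ t = x) from fun hc => hx hc.2.symm), add_zero, hqO x]
              unfold rO; rw [if_pos hrange]
            · rw [if_neg hpidx]
      · have hcont : ¬ ((dropF (rI T O k t I idx) pj.2).contains t = true) := by
          simpa using hmem
        rw [if_neg hcont]
        have hclq : (pj.2.count t : Int) ≤ rI T O k t I idx t := by
          by_contra hcl
          exact hmem ((mem_dropF pj.2 _ t (hq0 t)).2 (by omega))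
        have hq_le_c : rI T O k t I idx t ≤ cB T idx t := by
          rw [hqmin]; exact min_le_left _ _
        have hq_le_d : rI T O k t I idx t ≤ DO O idx t := by
          rw [hqmin]; exact min_le_right _ _
        have hcd : cB T idx t ≤ DO O idx t := by
          rw [hcb]; omega
        have hEq : ∀ p ∈ T, ∀ x, rI T O k t I p.1 x = rI T O k t (I ++ [idx]) p.1 x := by
          intro p hp x
          rw [rI_snoc T O k t I idx p.1 x hIdx]
          by_cases hpidx : p.1 = idx
          · rw [if_pos hpidx, hpidx, hO'min x]
            by_cases hx : x = t
            · rw [hx, if_pos ⟨hki, rfl⟩, hqmin, min_eq_left (by omega), min_eq_left (by omega)]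
            · rw [if_neg (show ¬(k < idx ∧ t = x) from fun hc => hx hc.2.symm), add_zero, hqO x]
              unfold rO; rw [if_pos hrange]
          · rw [if_neg hpidx]
        refine ⟨?_, ?_⟩
        · rw [h1]
          exact congrArg PySem.Dict.mk (mkmap_congr T _ _ hEq)
        · intro x
          rw [h2 x, summap_congr T _ _ x (fun p hp => hEq p hp x)]
    · have hbucket : st.1.getD idx [] = [] := by
        rw [h1]
        apply PySem.Dict.getD_of_not_contains
        rw [Bool.eq_false_iff]
        intro hcon
        exact hKey (by simpa [PySem.Dict.keys, items_mk, List.map_map, Function.comp] using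
          (PySem.Dict.contains_iff_mem_keys _ _).1 hcon)
      rw [hbucket, if_neg (by simp : ¬((([] : List Int).contains t) = true))]
      have hEq : ∀ p ∈ T, ∀ x, rI T O k t I p.1 x = rI T O k t (I ++ [idx]) p.1 x := by
        intro p hp x
        rw [rI_snoc T O k t I idx p.1 x hIdx,
          if_neg (fun hc => hKey (by rw [← hc]; exact List.mem_map.2 ⟨p, hp, rfl⟩))]
      refine ⟨?_, ?_⟩
      · rw [h1]
        exact congrArg PySem.Dict.mk (mkmap_congr T _ _ hEq)
      · intro x
        rw [h2 x, summap_congr T _ _ x (fun p hp => hEq p hp x)]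

theorem rO_noop (T : List (Int × List Int)) (hnd : (T.map (·.1)).Nodup)
    (O : List (Int × Int)) (hv : validO T O) (p0 : Int × List Int) (hp0 : p0 ∈ T)
    (t : Int) (ht : t ∈ p0.2) (hle : totB T t - sumR T O t ≤ 1) :
    ∀ j x, rO T (O ++ [(p0.1, t)]) j x = rO T O j x := by
  intro j x
  by_cases hx : x = t
  · subst hx
    by_cases hj : p0.1 < j
    · by_cases hr : 1 ≤ j ∧ j ≤ 5
      · have hcd := guard_noop T hnd O hv p0 hp0 x ht hle j hj hr.1 hr.2
        unfold rO
        rw [if_pos hr, if_pos hr, DO_append, DO_single, if_pos ⟨hj, rfl⟩]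
        rw [min_eq_left hcd, min_eq_left (by omega)]
      · unfold rO; rw [if_neg hr, if_neg hr]
    · exact rO_append_single_le T O p0.1 x j x (by omega)
  · exact rO_append_single_ne T O p0.1 t j x hx

theorem ticket_step (T : List (Int × List Int)) (hnd : (T.map (·.1)).Nodup)
    (O : List (Int × Int)) (hv : validO T O) (p0 : Int × List Int) (hp0 : p0 ∈ T)
    (t : Int) (ht : t ∈ p0.2) (st : PySem.Dict Int (List Int) × PySem.Dict Int Int)
    (h : INVA T O st) : INVA T (O ++ [(p0.1, t)]) (aTicketStep p0.1 st t) := by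
  obtain ⟨h1, h2⟩ := h
  simp only [aTicketStep]
  by_cases hg : st.2.getD t 0 > 1
  · rw [if_pos hg]
    have hinit : INVI T O p0.1 t [] st := by
      refine ⟨?_, ?_⟩
      · rw [h1]
        exact congrArg PySem.Dict.mk
          (mkmap_congr T _ _ (fun p hp x => (rI_nil T O p0.1 t p.1 x).symm))
      · intro x
        rw [h2 x]
        unfold sumR
        rw [summap_congr T _ _ x (fun p hp => (rI_nil T O p0.1 t p.1 x).symm)]
    have hfold : INVI T O p0.1 t [1, 2, 3, 4, 5]
        ((PySem.List.pyRange 1 6 1).foldl (aIdxStep p0.1 t) st) := by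
      rw [show PySem.List.pyRange 1 6 1 = [1, 2, 3, 4, 5] from by decide]
      simp only [List.foldl_cons, List.foldl_nil]
      exact idx_step T hnd O p0.1 t [1, 2, 3, 4] 5 (by constructor <;> decide) (by decide) _
        (idx_step T hnd O p0.1 t [1, 2, 3] 4 (by constructor <;> decide) (by decide) _
          (idx_step T hnd O p0.1 t [1, 2] 3 (by constructor <;> decide) (by decide) _
            (idx_step T hnd O p0.1 t [1] 2 (by constructor <;> decide) (by decide) _
              (idx_step T hnd O p0.1 t [] 1 (by constructor <;> decide) (by decide) st hinit))))
    obtain ⟨f1, f2⟩ := hfold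
    refine ⟨?_, ?_⟩
    · rw [f1]
      exact congrArg PySem.Dict.mk
        (mkmap_congr T _ _ (fun p hp x => rI_full T O p0.1 t p.1 x))
    · intro x
      rw [f2 x]
      unfold sumR
      rw [summap_congr T _ _ x (fun p hp => rI_full T O p0.1 t p.1 x)]
  · rw [if_neg hg]
    have hle : totB T t - sumR T O t ≤ 1 := by have := h2 t; omega
    have hno := rO_noop T hnd O hv p0 hp0 t ht hle
    refine ⟨?_, ?_⟩
    · rw [h1]
      exact congrArg PySem.Dict.mk (mkmap_congr T _ _ (fun p hp x => (hno p.1 x).symm))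
    · intro x
      rw [h2 x]
      unfold sumR
      rw [summap_congr T _ _ x (fun p hp => (hno p.1 x).symm)]

theorem tickets_fold (T : List (Int × List Int)) (hnd : (T.map (·.1)).Nodup)
    (p0 : Int × List Int) (hp0 : p0 ∈ T) :
    ∀ (l : List Int) (O : List (Int × Int)) (st : PySem.Dict Int (List Int) × PySem.Dict Int Int),
    (∀ t ∈ l, t ∈ p0.2) → validO T O → INVA T O st →
    INVA T (O ++ l.map (fun t => (p0.1, t))) (l.foldl (aTicketStep p0.1) st) ∧
      validO T (O ++ l.map (fun t => (p0.1, t)))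
  | [], O, st, hsub, hv, h => by simpa using ⟨h, hv⟩
  | t :: l, O, st, hsub, hv, h => by
    have hstep := ticket_step T hnd O hv p0 hp0 t (hsub t List.mem_cons_self) st h
    have hv' : validO T (O ++ [(p0.1, t)]) := by
      intro e he
      rcases List.mem_append.1 he with he | he
      · exact hv e he
      · have he' : e = (p0.1, t) := by simpa using he
        exact ⟨p0, hp0, by rw [he'], by rw [he']; exact hsub t List.mem_cons_self⟩
    have hrec := tickets_fold T hnd p0 hp0 l (O ++ [(p0.1, t)]) (aTicketStep p0.1 st t)
      (fun u hu => hsub u (List.mem_cons_of_mem _ hu)) hv' hstep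
    simpa [List.append_assoc] using hrec

theorem pairs_fold (T : List (Int × List Int)) (hnd : (T.map (·.1)).Nodup) :
    ∀ (L : List (Int × List Int)) (O : List (Int × Int))
      (st : PySem.Dict Int (List Int) × PySem.Dict Int Int),
    (∀ p ∈ L, p ∈ T) → validO T O → INVA T O st →
    INVA T (O ++ occStream L) (L.foldl aPairStep st)
  | [], O, st, _, _, h => by simpa [occStream] using h
  | p :: L, O, st, hL, hv, h => by
    have hone := tickets_fold T hnd p (hL p List.mem_cons_self) p.2 O st (fun t ht => ht) hv h
    have hrec := pairs_fold T hnd L (O ++ p.2.map (fun t => (p.1, t)))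
      (p.2.foldl (aTicketStep p.1) st)
      (fun q hq => hL q (List.mem_cons_of_mem _ hq)) hone.2 hone.1
    simpa [occStream, List.append_assoc, aPairStep] using hrec

-- ===== the common normal form =====
def canon (T : List (Int × List Int)) : List (Int × List Int) :=
  T.map (fun p => (p.1, dropF
    (fun x => if 1 ≤ p.1 ∧ p.1 ≤ 5 then min (cB T p.1 x) (SB T p.1 x) else 0) p.2))

theorem flatten_map_snd (T : List (Int × List Int)) :
    (T.map (fun p => p.2)).flatten = T.flatMap (fun p => p.2) := by
  induction T with
  | nil => simp
  | cons p T ih => simp [ih]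

theorem portA_eq_canon (T : List (Int × List Int)) (hnd : (T.map (·.1)).Nodup) :
    remove_duplicate_tickets T = canon T := by
  simp only [remove_duplicate_tickets]
  rw [PySem.List.foldl_append_eq_flatten, List.nil_append,
    show (PySem.Dict.mk T).values = T.map (fun p => p.2) from rfl, flatten_map_snd,
    PySem.Dict.foldl_insert_getD_add_one_eq_counter, items_mk]
  have hinit : INVA T [] (PySem.Dict.mk T, PySem.Dict.counter (T.flatMap (fun p => p.2))) := by
    refine ⟨?_, ?_⟩
    · have hid : ∀ p ∈ T, (p.1, dropF (rO T [] p.1) p.2) = p := by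
        intro p hp
        rw [dropF_nonpos p.2 _ (fun x _ => le_of_eq (rO_nil T p.1 x))]
      show PySem.Dict.mk T = _
      rw [List.map_congr_left hid]
      apply PySem.Dict.ext
      simp
    · intro x
      show (PySem.Dict.counter (T.flatMap (fun p => p.2))).getD x 0 = _
      rw [PySem.Dict.getD_counter, sumR_nil]
      unfold totB
      ring
  have hfinal := pairs_fold T hnd T [] _ (fun p hp => hp)
    (fun e he => absurd he (List.not_mem_nil)) hinit
  rw [List.nil_append] at hfinal
  refine (congrArg PySem.Dict.items hfinal.1).trans ?_
  rw [items_mk]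
  unfold canon
  apply List.map_congr_left
  intro p hp
  have hfn : rO T (occStream T) p.1
      = fun x => if 1 ≤ p.1 ∧ p.1 ≤ 5 then min (cB T p.1 x) (SB T p.1 x) else 0 := by
    funext x
    unfold rO
    rw [DO_occStream]
  rw [hfn]

-- ===== B-side =====
theorem bucket_of_mem (T : List (Int × List Int)) (p : Int × List Int)
    (hnd : (T.map (·.1)).Nodup) (hp : p ∈ T) : (PySem.Dict.mk T).getD p.1 [] = p.2 := by
  rw [PySem.Dict.getD_of_mem_items (PySem.Dict.mk T) (by simpa using hp)
    (by simpa [PySem.Dict.keys] using hnd)]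

theorem bCount_eq_counter (l : List Int) : bCount l = PySem.Dict.counter l := by
  unfold bCount
  rw [PySem.Dict.foldl_insert_getD_add_one_eq_counter]

theorem bCount_items (l : List Int) :
    (bCount l).items = (PySem.Set.ofList l).map (fun v => (v, (l.count v : Int))) := by
  rw [bCount_eq_counter, PySem.Dict.items_counter]

theorem foldl_pref_add : ∀ (vs : List Int) (g : Int → Int) (pr : PySem.Dict Int Int) (x : Int),
    vs.Nodup →
    ((vs.map (fun v => (v, g v))).foldl
        (fun pr xc => pr.insert xc.1 (pr.getD xc.1 0 + xc.2)) pr).getD x 0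
      = pr.getD x 0 + (if x ∈ vs then g x else 0)
  | [], g, pr, x, _ => by simp
  | v :: vs, g, pr, x, hnd => by
    simp only [List.map_cons, List.foldl_cons]
    rw [foldl_pref_add vs g _ x hnd.of_cons]
    rw [PySem.Dict.getD_insert]
    by_cases hx : x = v
    · subst hx
      rw [if_pos rfl, if_pos List.mem_cons_self,
        if_neg (by intro hc; exact (List.nodup_cons.1 hnd).1 hc)]
      ring
    · rw [if_neg hx]
      by_cases hm : x ∈ vs
      · rw [if_pos hm, if_pos (List.mem_cons_of_mem _ hm)]
      · rw [if_neg hm, if_neg (by intro hc; rcases List.mem_cons.1 hc with h | h; exact hx h; exact hm h)]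

theorem pref_step (l : List Int) (pr : PySem.Dict Int Int) (x : Int) :
    ((bCount l).items.foldl (fun pr xc => pr.insert xc.1 (pr.getD xc.1 0 + xc.2)) pr).getD x 0
      = pr.getD x 0 + (l.count x : Int) := by
  rw [bCount_items, foldl_pref_add (PySem.Set.ofList l) (fun v => (l.count v : Int)) pr x
    (PySem.Set.nodup_ofList l)]
  by_cases hx : x ∈ l
  · rw [if_pos ((PySem.Set.mem_ofList _ _).2 hx)]
  · rw [if_neg (fun hc => hx ((PySem.Set.mem_ofList _ _).1 hc)),
      List.count_eq_zero_of_not_mem hx]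
    simp

-- the quota dict built by bKeyStep, characterised
theorem qd_getD (l : List Int) (pr : PySem.Dict Int Int) (x : Int) :
    ((bCount l).items.foldl (fun d xc => d.insert xc.1 (min xc.2 (pr.getD xc.1 0)))
        PySem.Dict.empty).getD x 0
      = if x ∈ l then min ((l.count x : Int)) (pr.getD x 0) else 0 := by
  have hitems : ((bCount l).items.foldl (fun d xc => d.insert xc.1 (min xc.2 (pr.getD xc.1 0)))
        PySem.Dict.empty).items
      = (PySem.Set.ofList l).map (fun v => (v, min ((l.count v : Int)) (pr.getD v 0))) := by
    rw [PySem.Dict.items_foldl_insert_fresh (bCount l).items (fun xc => xc.1)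
      (fun xc => min xc.2 (pr.getD xc.1 0)) PySem.Dict.empty
      (fun a _ => PySem.Dict.contains_empty _)
      (by rw [bCount_items, List.map_map]; simp [Function.comp_def])]
    rw [show (PySem.Dict.empty : PySem.Dict Int Int).items = [] from rfl, List.nil_append,
      bCount_items, List.map_map]
    rfl
  by_cases hx : x ∈ l
  · rw [PySem.Dict.getD_of_mem_items _
      (show (x, min ((l.count x : Int)) (pr.getD x 0)) ∈ _ from by
        rw [hitems]
        exact List.mem_map.2 ⟨x, (PySem.Set.mem_ofList _ _).2 hx, rfl⟩)
      (by rw [PySem.Dict.keys, hitems, List.map_map]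
          simp [Function.comp_def]),
      if_pos hx]
  · rw [if_neg hx, PySem.Dict.getD_of_not_contains]
    rw [Bool.eq_false_iff]
    intro hcon
    have := (PySem.Dict.contains_iff_mem_keys _ _).1 hcon
    rw [PySem.Dict.keys, hitems, List.map_map] at this
    obtain ⟨v, hv, hvx⟩ := List.mem_map.1 this
    have hveq : v = x := hvx
    exact hx (hveq ▸ (PySem.Set.mem_ofList _ _).1 hv)

def BINV (T : List (Int × List Int)) (done : List Int)
    (pd : PySem.Dict Int Int × PySem.Dict Int (PySem.Dict Int Int)) : Prop :=
  (∀ x, pd.1.getD x 0 = (done.map (fun k' => cB T k' x)).sum) ∧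
  (∀ j, (1 ≤ j ∧ j ≤ 5 ∧ j ∈ done) →
      ∃ q, pd.2.get? j = some q ∧
        ∀ x, q.getD x 0
          = if x ∈ (PySem.Dict.mk T).getD j [] then min (cB T j x) (SB T j x) else 0) ∧
  (∀ j, ¬(1 ≤ j ∧ j ≤ 5 ∧ j ∈ done) → pd.2.get? j = none)

theorem cB_cons (p : Int × List Int) (T : List (Int × List Int)) (k' x : Int) :
    cB (p :: T) k' x = if p.1 = k' then ((p.2.count x : Int)) else cB T k' x := by
  unfold cB
  rw [PySem.Dict.getD_eq_get?_getD, PySem.Dict.get?_mk_cons]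
  by_cases h : p.1 = k'
  · simp [h]
  · rw [if_neg h, if_neg (by simpa using h), ← PySem.Dict.getD_eq_get?_getD]

theorem SB_cons (p : Int × List Int) (T : List (Int × List Int)) (j x : Int) :
    SB (p :: T) j x = (if p.1 < j then (p.2.count x : Int) else 0) + SB T j x := by
  unfold SB
  rw [List.filter_cons]
  by_cases h : p.1 < j
  · rw [if_pos (by simpa using h), if_pos h, List.flatMap_cons, List.count_append]
    push_cast
    ring
  · rw [if_neg (by simpa using h), if_neg h, zero_add]

theorem sum_cB_eq_SB (x : Int) :
    ∀ (T : List (Int × List Int)), (T.map (·.1)).Nodup → ∀ (j : Int),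
    ((((T.map (·.1)).filter (fun k' => decide (k' < j))).map (fun k' => cB T k' x)).sum : Int)
      = SB T j x
  | [], _, j => by simp [SB]
  | p :: T, hnd, j => by
    have hnd' : (T.map (·.1)).Nodup := (List.nodup_cons.1 hnd).2
    have hp1 : p.1 ∉ T.map (·.1) := (List.nodup_cons.1 hnd).1
    have hcongr : ∀ k' ∈ (T.map (·.1)).filter (fun k' => decide (k' < j)),
        cB (p :: T) k' x = cB T k' x := by
      intro k' hk'
      have hk'T : k' ∈ T.map (·.1) := List.mem_of_mem_filter hk'
      rw [cB_cons, if_neg (fun hc => hp1 (by rw [hc]; exact hk'T))]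
    rw [SB_cons]
    simp only [List.map_cons, List.filter_cons]
    by_cases h : p.1 < j
    · rw [if_pos (by simpa using h), List.map_cons, List.sum_cons,
        List.map_congr_left hcongr, sum_cB_eq_SB x T hnd' j,
        cB_cons, if_pos rfl, if_pos h]
    · rw [if_neg (by simpa using h), List.map_congr_left hcongr,
        sum_cB_eq_SB x T hnd' j, if_neg h, zero_add]

theorem bKeyStep_inv (T : List (Int × List Int)) (hnd : (T.map (·.1)).Nodup)
    (k : Int) (done : List Int)
    (pd : PySem.Dict Int Int × PySem.Dict Int (PySem.Dict Int Int))
    (hstate : BINV T done pd)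
    (hperm : done.Perm ((T.map (·.1)).filter (fun k' => decide (k' < k)))) :
    BINV T (done ++ [k]) (bKeyStep (PySem.Dict.mk T) pd k) := by
  obtain ⟨hp, hq, hn⟩ := hstate
  have hpref_k : ∀ x, pd.1.getD x 0 = SB T k x := by
    intro x
    rw [hp x, (hperm.map (fun k' => cB T k' x)).sum_eq, sum_cB_eq_SB x T hnd k]
  have hfst : (bKeyStep (PySem.Dict.mk T) pd k).1
      = (bCount ((PySem.Dict.mk T).getD k [])).items.foldl
          (fun pr xc => pr.insert xc.1 (pr.getD xc.1 0 + xc.2)) pd.1 := rfl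
  have hsnd : (bKeyStep (PySem.Dict.mk T) pd k).2
      = (if 1 ≤ k ∧ k ≤ 5 then
          pd.2.insert k ((bCount ((PySem.Dict.mk T).getD k [])).items.foldl
            (fun d xc => d.insert xc.1 (min xc.2 (pd.1.getD xc.1 0))) PySem.Dict.empty)
        else pd.2) := rfl
  refine ⟨?_, ?_, ?_⟩
  · intro x
    rw [hfst, pref_step, hp x, List.map_append, List.sum_append]
    simp [cB]
  · intro j hj
    by_cases hjk : j = k
    · subst hjk
      rw [hsnd, if_pos ⟨hj.1, hj.2.1⟩]
      refine ⟨_, PySem.Dict.get?_insert_self _ _ _, ?_⟩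
      intro x
      rw [qd_getD]
      by_cases hx : x ∈ (PySem.Dict.mk T).getD j []
      · rw [if_pos hx, if_pos hx, hpref_k x]
        rfl
      · rw [if_neg hx, if_neg hx]
    · have hjd : j ∈ done := by
        rcases List.mem_append.1 hj.2.2 with h | h
        · exact h
        · exact absurd (by simpa using h) hjk
      obtain ⟨q, hget, hchar⟩ := hq j ⟨hj.1, hj.2.1, hjd⟩
      rw [hsnd]
      split_ifs with hrk
      · exact ⟨q, (PySem.Dict.get?_insert_of_ne _ _ hjk).trans hget, hchar⟩
      · exact ⟨q, hget, hchar⟩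
  · intro j hj
    have hj' : ¬(1 ≤ j ∧ j ≤ 5 ∧ j ∈ done) :=
      fun hc => hj ⟨hc.1, hc.2.1, List.mem_append_left _ hc.2.2⟩
    rw [hsnd]
    split_ifs with hrk
    · by_cases hjk : j = k
      · subst hjk
        exact absurd ⟨hrk.1, hrk.2, List.mem_append_right _ List.mem_cons_self⟩ hj
      · exact (PySem.Dict.get?_insert_of_ne _ _ hjk).trans (hn j hj')
    · exact hn j hj'

theorem bkeys_fold (T : List (Int × List Int)) (hnd : (T.map (·.1)).Nodup) :
    ∀ (rest done : List Int) (pd : PySem.Dict Int Int × PySem.Dict Int (PySem.Dict Int Int)),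
    (done ++ rest).Perm (T.map (·.1)) → (done ++ rest).Pairwise (· < ·) →
    BINV T done pd →
    BINV T (done ++ rest) (rest.foldl (bKeyStep (PySem.Dict.mk T)) pd)
  | [], done, pd, _, _, h => by simpa using h
  | k :: rest, done, pd, hperm, hpw, h => by
    have hpwparts := List.pairwise_append.1 hpw
    have hlt : ∀ k' ∈ done, k' < k := fun k' hk' => hpwparts.2.2 k' hk' k List.mem_cons_self
    have hpermk : done.Perm ((T.map (·.1)).filter (fun k' => decide (k' < k))) := by
      have hfilter := hperm.filter (fun k' => decide (k' < k))
      rw [List.filter_append] at hfilter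
      have h1 : done.filter (fun k' => decide (k' < k)) = done :=
        List.filter_eq_self.2 (fun a ha => by simpa using hlt a ha)
      have h2 : (k :: rest).filter (fun k' => decide (k' < k)) = [] := by
        apply List.filter_eq_nil_iff.2
        intro a ha
        rcases List.mem_cons.1 ha with h | h
        · subst h; simp
        · have := List.rel_of_pairwise_cons hpwparts.2.1 h
          simp; omega
      rw [h1, h2, List.append_nil] at hfilter
      exact hfilter
    have hstep := bKeyStep_inv T hnd k done pd h hpermk
    have hrec := bkeys_fold T hnd rest (done ++ [k]) _
      (by simpa [List.append_assoc] using hperm)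
      (by simpa [List.append_assoc] using hpw) hstep
    simpa [List.append_assoc] using hrec

theorem consume_eq_dropF : ∀ (l : List Int) (dq : PySem.Dict Int Int) (acc : List Int),
    (∀ x, 0 ≤ dq.getD x 0) →
    (l.foldl bConsume (acc, dq)).1 = acc ++ dropF (fun x => dq.getD x 0) l
  | [], dq, acc, _ => by simp [dropF]
  | a :: l, dq, acc, h => by
    simp only [List.foldl_cons, bConsume]
    by_cases hga : dq.getD a 0 > 0
    · rw [if_pos hga]
      rw [consume_eq_dropF l _ acc (fun x => by
        rw [PySem.Dict.getD_insert]
        split_ifs with hx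
        · omega
        · exact h x)]
      have hfn : (fun x => (dq.insert a (dq.getD a 0 - 1)).getD x 0)
          = (fun y => if y = a then dq.getD y 0 - 1 else dq.getD y 0) := by
        funext y
        rw [PySem.Dict.getD_insert]
        by_cases hy : y = a
        · subst hy; simp
        · simp [hy]
      rw [hfn]
      simp only [dropF]
      rw [if_pos hga]
    · rw [if_neg hga]
      rw [consume_eq_dropF l dq (acc ++ [a]) h]
      simp only [dropF]
      rw [if_neg (by omega)]
      simp

theorem portB_eq_canon (T : List (Int × List Int)) (hnd : (T.map (·.1)).Nodup) :
    remove_duplicate_tickets_alt T = canon T := by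
  simp only [remove_duplicate_tickets_alt]
  have hkeys : (PySem.Dict.mk T).keys = T.map (·.1) := rfl
  have hperm : (PySem.List.sorted (PySem.Dict.mk T).keys (fun k => k) false).Perm (T.map (·.1)) := by
    rw [← hkeys]; exact PySem.List.sorted_perm _ _ _
  have hksnd : (PySem.List.sorted (PySem.Dict.mk T).keys (fun k => k) false).Nodup :=
    (hperm.nodup_iff).2 hnd
  have hpwle : (PySem.List.sorted (PySem.Dict.mk T).keys (fun k => k) false).Pairwise (· ≤ ·) :=
    PySem.List.sorted_pairwise _ _
  have hpwlt : (PySem.List.sorted (PySem.Dict.mk T).keys (fun k => k) false).Pairwise (· < ·) :=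
    (hpwle.and hksnd).imp (fun h => lt_of_le_of_ne h.1 h.2)
  have hinit : BINV T [] (PySem.Dict.empty, PySem.Dict.empty) := by
    refine ⟨?_, ?_, ?_⟩
    · intro x; simp [PySem.Dict.getD_empty]
    · intro j hj; exact absurd hj.2.2 (List.not_mem_nil)
    · intro j _; exact PySem.Dict.get?_empty j
  have hB := bkeys_fold T hnd (PySem.List.sorted (PySem.Dict.mk T).keys (fun k => k) false) []
    (PySem.Dict.empty, PySem.Dict.empty) (by simpa using hperm) (by simpa using hpwlt) hinit
  rw [List.nil_append] at hB
  set pd := (PySem.List.sorted (PySem.Dict.mk T).keys (fun k => k) false).foldl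
    (bKeyStep (PySem.Dict.mk T)) (PySem.Dict.empty, PySem.Dict.empty) with hpd
  obtain ⟨hBp, hBq, hBn⟩ := hB
  have hout : bOutStep pd.2 = fun (out : PySem.Dict Int (List Int)) kv =>
      out.insert kv.1 (if pd.2.contains kv.1 then
        (kv.2.foldl bConsume ([], pd.2.getD kv.1 PySem.Dict.empty)).1 else kv.2) := by
    funext out kv
    simp only [bOutStep]
    split_ifs <;> rfl
  rw [hout]
  rw [PySem.Dict.items_foldl_insert_fresh T (fun kv => kv.1)
    (fun kv => if pd.2.contains kv.1 then
      (kv.2.foldl bConsume ([], pd.2.getD kv.1 PySem.Dict.empty)).1 else kv.2)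
    PySem.Dict.empty (fun a _ => PySem.Dict.contains_empty _) hnd]
  rw [show (PySem.Dict.empty : PySem.Dict Int (List Int)).items = [] from rfl, List.nil_append]
  unfold canon
  apply List.map_congr_left
  intro p hp
  have hmemks : p.1 ∈ PySem.List.sorted (PySem.Dict.mk T).keys (fun k => k) false :=
    hperm.mem_iff.2 (List.mem_map.2 ⟨p, hp, rfl⟩)
  by_cases hr : 1 ≤ p.1 ∧ p.1 ≤ 5
  · obtain ⟨q, hget, hchar⟩ := hBq p.1 ⟨hr.1, hr.2, hmemks⟩
    have hcont : pd.2.contains p.1 = true := by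
      rw [PySem.Dict.contains_eq_isSome_get?, hget]
      rfl
    rw [if_pos hcont]
    have hgetD : pd.2.getD p.1 PySem.Dict.empty = q := by
      rw [PySem.Dict.getD_eq_get?_getD, hget]
      rfl
    rw [hgetD]
    have hq0 : ∀ x, 0 ≤ q.getD x 0 := by
      intro x
      rw [hchar x]
      split_ifs with hx
      · exact le_min (cB_nonneg T p.1 x) (SB_nonneg T p.1 x)
      · exact le_refl 0
    rw [consume_eq_dropF p.2 q [] hq0, List.nil_append]
    refine congrArg (Prod.mk p.1) ?_
    apply dropF_congr
    intro x hx
    rw [hchar x, bucket_of_mem T p hnd hp, if_pos hx, if_pos hr]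
  · have hnone : pd.2.get? p.1 = none := hBn p.1 (fun hc => hr ⟨hc.1, hc.2.1⟩)
    have hcont : pd.2.contains p.1 = false := by
      rw [PySem.Dict.contains_eq_isSome_get?, hnone]
      rfl
    rw [hcont]
    simp only [Bool.false_eq_true, if_false]
    refine congrArg (Prod.mk p.1) ?_
    rw [dropF_nonpos p.2 _ (fun x _ => by rw [if_neg hr])]

-- ===== VERDICT (by name: the statement is the Claim_ definition above) =====
theorem remove_duplicate_tickets_spec : Claim_equal_remove_duplicate_tickets := by
  intro T _ hpre
  unfold Spec_remove_duplicate_tickets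
  rw [portA_eq_canon T hpre.1, portB_eq_canon T hpre.1]
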